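-- pv_equiv track=rewrite | github.com/LAHBIBMedAMINE/pythonChallenge | puzzle14.py | movewest
-- ===== SOURCE A (Python) =====
-- def movewest(grid):
--     for row in grid:
--         for x in range(len(grid[0])):
--             if row[x] == 'O':
--                 j = x - 1
--                 while 0 <= j < len(grid[0]) and row[j] == '.':
--                     row[j] = 'O'
--                     row[x] = '.'
--                     x -= 1
--                     j = x - 1
--     return grid
-- ===== SOURCE B (Python) =====
-- def movewest(grid):
--     if not grid:
--         return grid
--     w = len(grid[0])
--     for row in grid:
--         out = []
--         o = n = 0
--         for c in row[:w]:
--             if c == 'O':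
--                 o += 1
--                 n += 1
--             elif c == '.':
--                 n += 1
--             else:
--                 out += ['O'] * o + ['.'] * (n - o) + [c]
--                 o = n = 0
--         out += ['O'] * o + ['.'] * (n - o)
--         row[:w] = out
--     return grid
-- ===== Notes on version B (the rewrite author's own statement) =====
-- stated objective: alternative
-- what changed: Replaces A's per-'O' bubbling (an inner while loop that swaps each 'O' leftward one cell at a time) by a single per-row pass that counts 'O's and cells of each wall-delimited segment and rewrites the segment packed.
import Mathlib
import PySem

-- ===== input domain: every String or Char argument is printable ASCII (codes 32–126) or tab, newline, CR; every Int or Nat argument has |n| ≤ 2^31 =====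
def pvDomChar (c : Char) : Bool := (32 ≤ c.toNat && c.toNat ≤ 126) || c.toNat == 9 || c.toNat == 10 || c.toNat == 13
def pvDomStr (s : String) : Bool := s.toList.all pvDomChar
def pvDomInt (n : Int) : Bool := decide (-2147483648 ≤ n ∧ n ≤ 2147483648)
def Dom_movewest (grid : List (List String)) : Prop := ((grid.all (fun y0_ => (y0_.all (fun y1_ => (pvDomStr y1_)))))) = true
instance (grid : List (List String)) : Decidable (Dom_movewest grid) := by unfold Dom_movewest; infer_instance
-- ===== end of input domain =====

-- B replaces A's per-'O' bubbling while-loop by a single per-row segment-counting pass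
-- (count 'O's/cells between walls, rewrite the segment packed); equivalence is about the
-- return value (both Pythons also mutate the rows in place in the same way).

-- ===== PORT A =====
-- inner while loop of A: slide the 'O' at index x left over '.' cells, one swap at a time
def mwSlide (W : Nat) (row : List String) (x : Nat) : List String :=
  if h : 1 ≤ x ∧ x - 1 < W ∧ row.getD (x - 1) "" = "." then
    mwSlide W ((row.set (x - 1) "O").set x ".") (x - 1)
  else row
termination_by x
decreasing_by omega

-- outer 'for x in range(len(grid[0]))' loop of A on one row
def mwRowA (W : Nat) (row : List String) : List String :=
  (List.range W).foldl (fun r x => if r.getD x "" = "O" then mwSlide W r x else r) row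

def movewest (grid : List (List String)) : List (List String) :=
  match grid with
  | [] => []
  | g0 :: _ => grid.map (fun row => mwRowA g0.length row)

-- ===== PORT B =====
-- B's inner loop: o = 'O's and n = cells of the current wall-free segment; a wall flushes
-- the packed segment ('O' * o + '.' * (n-o) + wall), end of row flushes the last segment
def mwPack : List String → Nat → Nat → List String
  | [], o, n => List.replicate o "O" ++ List.replicate (n - o) "."
  | c :: cs, o, n =>
    if c = "O" then mwPack cs (o + 1) (n + 1)
    else if c = "." then mwPack cs o (n + 1)
    else List.replicate o "O" ++ List.replicate (n - o) "." ++ c :: mwPack cs 0 0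

def movewest_alt (grid : List (List String)) : List (List String) :=
  match grid with
  | [] => []
  | g0 :: _ =>
    grid.map (fun row => mwPack (row.take g0.length) 0 0 ++ row.drop g0.length)

-- ===== PRECONDITION & SPEC =====
-- Pre_ excludes exactly the grids on which A raises IndexError: those with a row shorter
-- than the first row (A indexes every row up to len(grid[0])).
def Pre_movewest (grid : List (List String)) : Prop :=
  ∀ row ∈ grid, (grid.headD []).length ≤ row.length
instance (grid : List (List String)) : Decidable (Pre_movewest grid) := by
  unfold Pre_movewest; infer_instance

def pvWitness_movewest : List (List String) :=
  [[".", "O", "#", "O"], [".", ".", "O", "."]]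

def Spec_movewest (grid : List (List String)) (out : List (List String)) : Prop :=
  out = movewest_alt grid
instance (grid : List (List String)) (out : List (List String)) : Decidable (Spec_movewest grid out) := by
  unfold Spec_movewest; infer_instance

-- ===== CLAIM (what is proved, stated in full; the proofs are below) =====
def Claim_equal_movewest : Prop :=
  ∀ (grid : List (List String)), Dom_movewest grid → Pre_movewest grid →
    Spec_movewest grid (movewest grid)

-- ===== LEMMAS AND PROOFS =====

-- state of B's scan: (flushed output, o, n)
def mwStep (s : List String × Nat × Nat) (c : String) : List String × Nat × Nat :=
  if c = "O" then (s.1, s.2.1 + 1, s.2.2 + 1)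
  else if c = "." then (s.1, s.2.1, s.2.2 + 1)
  else (s.1 ++ List.replicate s.2.1 "O" ++ List.replicate (s.2.2 - s.2.1) "." ++ [c], 0, 0)

def mwFlush (s : List String × Nat × Nat) : List String :=
  s.1 ++ List.replicate s.2.1 "O" ++ List.replicate (s.2.2 - s.2.1) "."

lemma mwStep_shift : ∀ (l d : List String) (o n : Nat),
    l.foldl mwStep (d, o, n) =
      (d ++ (l.foldl mwStep ([], o, n)).1, (l.foldl mwStep ([], o, n)).2) := by
  intro l
  induction l with
  | nil => intro d o n; simp
  | cons c cs ih =>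
    intro d o n
    simp only [List.foldl_cons, mwStep]
    split_ifs with h1 h2
    · simpa using ih d (o + 1) (n + 1)
    · simpa using ih d o (n + 1)
    · simp only [List.nil_append, List.append_assoc]
      rw [ih, ih (List.replicate o "O" ++ (List.replicate (n - o) "." ++ [c])) 0 0]
      simp [List.append_assoc]

lemma mwPack_flush : ∀ (l : List String) (o n : Nat),
    mwPack l o n = mwFlush (l.foldl mwStep ([], o, n)) := by
  intro l
  induction l with
  | nil => intro o n; simp [mwPack, mwFlush]
  | cons c cs ih =>
    intro o n
    simp only [mwPack, List.foldl_cons, mwStep]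
    split_ifs with h1 h2
    · simpa using ih (o + 1) (n + 1)
    · simpa using ih o (n + 1)
    · simp only [List.nil_append]
      rw [ih 0 0,
        mwStep_shift cs (List.replicate o "O" ++ List.replicate (n - o) "." ++ [c]) 0 0]
      simp [mwFlush, List.append_assoc]

def mwGood (s : List String × Nat × Nat) (k : Nat) : Prop :=
  s.2.1 ≤ s.2.2 ∧ (∀ c, s.1.getLast? = some c → c ≠ ".") ∧ s.1.length + s.2.2 = k

lemma mwInv : ∀ (l : List String) (s : List String × Nat × Nat) (k : Nat),
    mwGood s k → mwGood (l.foldl mwStep s) (k + l.length) := by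
  intro l
  induction l with
  | nil => intro s k h; simpa using h
  | cons c cs ih =>
    intro s k h
    obtain ⟨d, o, n⟩ := s
    obtain ⟨h1, h2, h3⟩ := h
    dsimp only at h1 h2 h3
    simp only [List.foldl_cons, mwStep, List.length_cons]
    rw [show k + (cs.length + 1) = (k + 1) + cs.length by omega]
    split_ifs with hO hD
    · exact ih (d, o + 1, n + 1) (k + 1) ⟨by dsimp only; omega, h2, by dsimp only; omega⟩
    · exact ih (d, o, n + 1) (k + 1) ⟨by dsimp only; omega, h2, by dsimp only; omega⟩
    · refine ih _ (k + 1) ⟨by dsimp only; omega, ?_, ?_⟩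
      · intro c' hc'
        dsimp only at hc'
        rw [List.getLast?_concat] at hc'
        cases hc'; exact hD
      · dsimp only
        simp only [List.length_append, List.length_replicate, List.length_cons,
          List.length_nil]
        omega

lemma mwSet_at_len {α : Type} : ∀ (p : List α) (b : α) (q : List α) (a : α),
    (p ++ b :: q).set p.length a = p ++ a :: q := by
  intro p
  induction p with
  | nil => intro b q a; simp
  | cons x p ih => intro b q a; simp [ih]

lemma mwGetD_at_len {α : Type} : ∀ (p : List α) (b : α) (q : List α) (d : α),
    (p ++ b :: q).getD p.length d = b := by
  intro p
  induction p with
  | nil => intro b q d; simp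
  | cons x p ih => intro b q d; rw [List.cons_append, List.length_cons, List.getD_cons_succ]; exact ih b q d

lemma mwSlide_spec : ∀ (dn : Nat) (A B : List String) (W : Nat),
    (∀ c, A.getLast? = some c → c ≠ ".") → A.length + dn < W →
    mwSlide W (A ++ List.replicate dn "." ++ "O" :: B) (A.length + dn)
      = A ++ "O" :: (List.replicate dn "." ++ B) := by
  intro dn
  induction dn with
  | zero =>
    intro A B W hA _
    rw [mwSlide, dif_neg]
    · simp
    · rintro ⟨hx, -, hdot⟩
      simp only [List.replicate_zero, List.append_nil, Nat.add_zero] at hdot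
      cases A with
      | nil => simp at hx
      | cons a A' =>
        have hlt : (a :: A').length - 1 < (a :: A').length := by simp
        rw [List.getD_append _ _ _ _ hlt] at hdot
        have hg : (a :: A').getD ((a :: A').length - 1) "" = (a :: A')[(a :: A').length - 1]'hlt := by
          rw [List.getD_eq_getElem?_getD, List.getElem?_eq_getElem hlt]
          rfl
        rw [hg] at hdot
        refine hA _ ?_ hdot
        rw [List.getLast?_eq_some_getLast (by simp), List.getLast_eq_getElem]
  | succ dn ih =>
    intro A B W hA hW
    have hsplit : A ++ List.replicate (dn + 1) "." ++ "O" :: B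
        = (A ++ List.replicate dn ".") ++ "." :: "O" :: B := by
      rw [List.replicate_succ']
      simp [List.append_assoc]
    have hx : A.length + (dn + 1) - 1 = A.length + dn := by omega
    have hlen : A.length + dn = (A ++ List.replicate dn ".").length := by simp
    have hset : ((A ++ List.replicate (dn + 1) "." ++ "O" :: B).set (A.length + (dn + 1) - 1) "O").set
          (A.length + (dn + 1)) "."
        = A ++ List.replicate dn "." ++ "O" :: "." :: B := by
      rw [hx, hsplit, hlen, mwSet_at_len]
      rw [show (A ++ List.replicate dn ".") ++ "O" :: "O" :: B
            = ((A ++ List.replicate dn ".") ++ ["O"]) ++ "O" :: B by simp]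
      rw [show A.length + (dn + 1) = ((A ++ List.replicate dn ".") ++ ["O"]).length by simp]
      rw [mwSet_at_len]
      simp [List.append_assoc]
    rw [mwSlide, dif_pos]
    · rw [hset, hx, ih A ("." :: B) W hA (by omega)]
      rw [List.replicate_succ']
      simp [List.append_assoc]
    · refine ⟨by omega, by omega, ?_⟩
      rw [hsplit, hx, hlen, mwGetD_at_len]

lemma mwOuter : ∀ (x W : Nat) (row : List String), x ≤ W → W ≤ row.length →
    (List.range x).foldl (fun r i => if r.getD i "" = "O" then mwSlide W r i else r) row
      = mwFlush ((row.take x).foldl mwStep ([], 0, 0)) ++ row.drop x := by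
  intro x
  induction x with
  | zero => intro W row _ _; simp [mwFlush]
  | succ x ih =>
    intro W row hxW hW
    rw [List.range_succ, List.foldl_append, ih W row (by omega) hW]
    simp only [List.foldl_cons, List.foldl_nil]
    have hxlt : x < row.length := by omega
    have hgood := mwInv (row.take x) ([], 0, 0) 0 ⟨le_rfl, by simp, by simp⟩
    rcases hS : (row.take x).foldl mwStep ([], 0, 0) with ⟨d, o, n⟩
    rw [hS] at hgood
    obtain ⟨hon, hlast, hlen⟩ := hgood
    simp only at hon hlast hlen
    have htk : (row.take x).length = x := by simp; omega
    have hdn : d.length + n = x := by omega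
    set c := row[x] with hc
    have hdrop : row.drop x = c :: row.drop (x + 1) := (List.getElem_cons_drop hxlt).symm
    have htake : row.take (x + 1) = row.take x ++ [c] := by
      rw [List.take_add_one, List.getElem?_eq_getElem hxlt]; rfl
    have hflen : (mwFlush (d, o, n)).length = x := by
      simp [mwFlush]; omega
    have hget : (mwFlush (d, o, n) ++ row.drop x).getD x "" = c := by
      rw [hdrop, ← hflen, mwGetD_at_len]
    rw [htake, List.foldl_append]
    simp only [hS, List.foldl_cons, List.foldl_nil]
    by_cases hcO : c = "O"
    · rw [hget, if_pos hcO]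
      have hshape : mwFlush (d, o, n) ++ row.drop x
          = (d ++ List.replicate o "O") ++ List.replicate (n - o) "." ++ "O" :: row.drop (x + 1) := by
        rw [hdrop, hcO]; simp [mwFlush, List.append_assoc]
      have hAlen : (d ++ List.replicate o "O").length + (n - o) = x := by simp; omega
      have hAlast : ∀ c', (d ++ List.replicate o "O").getLast? = some c' → c' ≠ "." := by
        cases o with
        | zero => simpa using hlast
        | succ o' =>
          intro c' hc'
          rw [List.replicate_succ', ← List.append_assoc, List.getLast?_concat] at hc'
          cases hc'; decide
      have hsl := mwSlide_spec (n - o) (d ++ List.replicate o "O")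
        (row.drop (x + 1)) W hAlast (by omega)
      rw [hAlen] at hsl
      rw [hshape, hsl]
      simp only [mwStep, mwFlush]
      rw [if_pos hcO]
      dsimp only
      rw [Nat.add_sub_add_right, List.replicate_succ']
      simp [List.append_assoc]
    · rw [hget, if_neg hcO]
      simp only [mwStep, mwFlush]
      rw [if_neg hcO]
      by_cases hcD : c = "."
      · rw [if_pos hcD]
        dsimp only
        rw [hdrop, hcD]
        rw [show n + 1 - o = (n - o) + 1 by omega, List.replicate_succ']
        simp [List.append_assoc]
      · rw [if_neg hcD]
        dsimp only
        rw [hdrop]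
        simp [List.append_assoc]

lemma mwRow_eq (W : Nat) (row : List String) (h : W ≤ row.length) :
    mwRowA W row = mwPack (row.take W) 0 0 ++ row.drop W := by
  unfold mwRowA
  rw [mwOuter W W row le_rfl h, mwPack_flush]

-- ===== VERDICT (by name: the statement is the Claim_ definition above) =====
theorem movewest_spec : Claim_equal_movewest := by
  intro grid _ hpre
  unfold Spec_movewest
  cases grid with
  | nil => rfl
  | cons g0 rest =>
    simp only [movewest, movewest_alt]
    refine List.map_congr_left ?_
    intro row hrow
    exact mwRow_eq g0.length row (by simpa using hpre row hrow)
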